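-- pv_equiv track=rewrite | github.com/bmuralid/Pure-Fortran | xsort_module.py | strip_string_literals
-- ===== SOURCE A (Python) =====
-- def strip_string_literals(stmt: str) -> str:
--     """Replace content inside quotes with spaces."""
--     out = list(stmt)
--     in_single = False
--     in_double = False
--     i = 0
--     while i < len(out):
--         ch = out[i]
--         if ch == "'" and not in_double:
--             in_single = not in_single
--             i += 1
--             continue
--         if ch == '"' and not in_single:
--             in_double = not in_double
--             i += 1
--             continue
--         if in_single or in_double:
--             if ch not in ("'", '"'):
--                 out[i] = " "
--         i += 1
--     return "".join(out)
-- ===== SOURCE B (Python) =====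
-- def strip_string_literals(stmt: str) -> str:
--     """Replace content inside quotes with spaces (quote-to-quote jumps, recursive)."""
--     for i, ch in enumerate(stmt):
--         if ch in "'\"":
--             j = stmt.find(ch, i + 1)
--             if j == -1:
--                 body = stmt[i + 1:]
--                 return stmt[:i + 1] + "".join(c if c in "'\"" else " " for c in body)
--             body = stmt[i + 1:j]
--             return (stmt[:i + 1]
--                     + "".join(c if c in "'\"" else " " for c in body)
--                     + ch
--                     + strip_string_literals(stmt[j + 1:]))
--     return stmt
-- ===== Notes on version B (the rewrite author's own statement) =====
-- stated objective: faster
-- what changed: Replaces the per-character index loop with two boolean state flags by a quote-to-quote scan: str.find locates the matching closing quote, the slice between quotes is blanked in one comprehension, and the function recurses on the remainder.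
import Mathlib
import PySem

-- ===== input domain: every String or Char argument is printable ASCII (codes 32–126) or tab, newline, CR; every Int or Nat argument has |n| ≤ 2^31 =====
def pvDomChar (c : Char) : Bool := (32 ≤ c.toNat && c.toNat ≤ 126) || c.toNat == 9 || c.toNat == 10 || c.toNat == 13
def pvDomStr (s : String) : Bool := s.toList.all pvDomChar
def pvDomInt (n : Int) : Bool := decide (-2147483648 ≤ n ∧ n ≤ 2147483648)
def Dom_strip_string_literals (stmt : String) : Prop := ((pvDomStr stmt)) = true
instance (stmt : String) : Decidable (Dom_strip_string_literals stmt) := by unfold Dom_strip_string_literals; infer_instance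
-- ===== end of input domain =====

-- B replaces A's per-character state-machine loop by a quote-to-quote scan (find the closing quote, blank the slice, recurse on the remainder); a timing run measured B faster by a constant factor.


-- ===== PORT A =====
-- the while loop over index i, consuming one character per iteration with the two flags
def stripA_go : List Char → Bool → Bool → List Char
  | [], _, _ => []
  | c :: rest, in_single, in_double =>
    if c = '\'' ∧ in_double = false then
      c :: stripA_go rest (!in_single) in_double
    else if c = '"' ∧ in_single = false then
      c :: stripA_go rest in_single (!in_double)
    else if in_single = true ∨ in_double = true then
      (if c ≠ '\'' ∧ c ≠ '"' then ' ' else c) :: stripA_go rest in_single in_double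
    else
      c :: stripA_go rest in_single in_double

def strip_string_literals (stmt : String) : String :=
  String.ofList (stripA_go stmt.toList false false)

-- ===== PORT B =====
-- '"".join(c if c in quotes else " " for c in body)'
def stripB_blank (body : List Char) : List Char :=
  body.map (fun c => if c = '\'' ∨ c = '"' then c else ' ')

-- scan to the first quote; str.find for its partner is the takeWhile/dropWhile split; recurse after it
def stripB_go : List Char → List Char
  | [] => []
  | c :: rest =>
    if c = '\'' ∨ c = '"' then
      match h : rest.dropWhile (· ≠ c) with
      | [] => c :: stripB_blank rest
      | _ :: tail => c :: stripB_blank (rest.takeWhile (· ≠ c)) ++ c :: stripB_go tail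
    else
      c :: stripB_go rest
termination_by xs => xs.length
decreasing_by
  · have h1 : (rest.dropWhile (· ≠ c)).length ≤ rest.length := rest.length_dropWhile_le _
    rw [h] at h1
    simp at h1 ⊢
    omega
  · simp

def strip_string_literals_alt (stmt : String) : String :=
  String.ofList (stripB_go stmt.toList)

-- ===== PRECONDITION & SPEC =====
def Spec_strip_string_literals (stmt : String) (out : String) : Prop := out = strip_string_literals_alt stmt
instance (stmt : String) (out : String) : Decidable (Spec_strip_string_literals stmt out) := by unfold Spec_strip_string_literals; infer_instance

-- ===== CLAIM (what is proved, stated in full; the proofs are below) =====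
def Claim_equal_strip_string_literals : Prop := ∀ (stmt : String), Dom_strip_string_literals stmt → Spec_strip_string_literals stmt (strip_string_literals stmt)

-- ===== LEMMAS AND PROOFS =====

-- While inside a quote opened by q, A blanks everything up to the closing q (keeping both quote chars).
theorem stripA_inside (q : Char) (hq : q = '\'' ∨ q = '"') (xs : List Char) :
    stripA_go xs (decide (q = '\'')) (decide (q = '"')) =
      (match xs.dropWhile (· ≠ q) with
       | [] => stripB_blank xs
       | _ :: tail => stripB_blank (xs.takeWhile (· ≠ q)) ++ q :: stripA_go tail false false) := by
  induction xs with
  | nil => simp [stripA_go, stripB_blank]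
  | cons c rest ih =>
    rcases hq with hq | hq <;> subst hq
    · by_cases hc : c = '\''
      · subst hc
        simp [stripA_go, stripB_blank, List.dropWhile, List.takeWhile]
      · simp only [stripA_go, List.dropWhile, List.takeWhile]
        by_cases hd : c = '"'
        · subst hd
          simp [stripB_blank] at ih ⊢
          rw [ih]
          cases hx : List.dropWhile (fun x => !decide (x = '\'')) rest <;> simp [hx]
        · simp [hc, hd, stripB_blank] at ih ⊢
          rw [ih]
          cases hx : List.dropWhile (fun x => !decide (x = '\'')) rest <;> simp [hx]
    · by_cases hc : c = '"'
      · subst hc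
        simp [stripA_go, stripB_blank, List.dropWhile, List.takeWhile]
      · simp only [stripA_go, List.dropWhile, List.takeWhile]
        by_cases hd : c = '\''
        · subst hd
          simp [stripB_blank] at ih ⊢
          rw [ih]
          cases hx : List.dropWhile (fun x => !decide (x = '"')) rest <;> simp [hx]
        · simp [hc, hd, stripB_blank] at ih ⊢
          rw [ih]
          cases hx : List.dropWhile (fun x => !decide (x = '"')) rest <;> simp [hx]

theorem stripA_eq_stripB (xs : List Char) : stripA_go xs false false = stripB_go xs := by
  induction xs using stripB_go.induct with
  | case1 => simp [stripA_go, stripB_go]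
  | case2 c rest hq h =>
    -- closing quote never found
    have hA := stripA_inside c hq rest
    simp only [ne_eq, decide_not] at h
    rcases hq with hq | hq <;> subst hq <;>
      simp [stripA_go, stripB_go, h] at hA ⊢ <;> rw [hA] <;> split <;> simp_all <;> (rename_i heq; rw [List.dropWhile_eq_nil_iff.mpr (by simpa using h)] at heq; cases heq)
  | case3 c rest hq x tail h ih =>
    have hA := stripA_inside c hq rest
    simp only [ne_eq, decide_not] at h
    rcases hq with hq | hq <;> subst hq <;>
      simp [stripA_go, stripB_go, h] at hA ⊢ <;> rw [hA] <;> split <;> simp_all <;> (rename_i heq; rw [List.dropWhile_eq_nil_iff.mpr (by simpa using h)] at heq; cases heq)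
  | case4 c rest hq ih =>
    have h1 : ¬ c = '\'' := fun h => hq (Or.inl h)
    have h2 : ¬ c = '"' := fun h => hq (Or.inr h)
    simp [stripA_go, stripB_go, h1, h2, ih]

-- ===== VERDICT (by name: the statement is the Claim_ definition above) =====
theorem strip_string_literals_spec : Claim_equal_strip_string_literals := by
  intro stmt _
  unfold Spec_strip_string_literals strip_string_literals strip_string_literals_alt
  rw [stripA_eq_stripB]
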